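-- pv_equiv track=rewrite | github.com/ImJoke/dsec | dsec/cli.py | _unbalanced_quotes
-- ===== SOURCE A (Python) =====
-- def _unbalanced_quotes(text: str) -> bool:
--     # Crude but effective for detecting multiline command strings.
--     escaped = False
--     single = 0
--     double = 0
--     for ch in text:
--         if escaped:
--             escaped = False
--             continue
--         if ch == "\\":
--             escaped = True
--             continue
--         if ch == "'":
--             single ^= 1
--         elif ch == '"':
--             double ^= 1
--     return bool(single or double)
-- ===== SOURCE B (Python) =====
-- import re
--
--
-- def _unbalanced_quotes(text: str) -> bool:
--     # Two staged passes: (1) delete every backslash-escaped character pair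
--     # (left-to-right, non-overlapping; a lone trailing backslash survives,
--     # which is harmless since it is not a quote); (2) check the parity of
--     # the surviving single and double quotes.
--     cleaned = re.sub(r'\\.', '', text, flags=re.DOTALL)
--     return cleaned.count("'") % 2 == 1 or cleaned.count('"') % 2 == 1
-- ===== Notes on version B (the rewrite author's own statement) =====
-- stated objective: idiomatic
-- what changed: Replaced A's one-pass escaped-flag xor state machine by two staged passes: re.sub deletes every backslash-escaped character pair, then str.count parity on the cleaned string decides the result.
import Mathlib
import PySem

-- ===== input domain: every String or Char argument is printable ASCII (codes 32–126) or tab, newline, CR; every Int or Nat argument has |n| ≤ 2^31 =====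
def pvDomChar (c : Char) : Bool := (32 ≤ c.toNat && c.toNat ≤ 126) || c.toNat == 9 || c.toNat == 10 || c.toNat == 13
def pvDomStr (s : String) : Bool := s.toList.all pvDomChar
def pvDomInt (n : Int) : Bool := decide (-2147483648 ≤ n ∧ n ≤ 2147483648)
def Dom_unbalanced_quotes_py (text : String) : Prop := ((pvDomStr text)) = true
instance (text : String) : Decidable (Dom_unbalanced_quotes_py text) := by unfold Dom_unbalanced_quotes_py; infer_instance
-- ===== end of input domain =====

-- B replaces A's one-pass escaped-flag xor state machine by two staged passes:
-- delete every backslash-escaped pair (re.sub), then quote-count parity (objective: idiomatic).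

-- ===== PORT A =====
-- A's loop body: state (escaped, single, double); branches in A's order.
def stepA (st : Bool × Nat × Nat) (ch : Char) : Bool × Nat × Nat :=
  match st with
  | (escaped, single, double) =>
    if escaped then (false, single, double)
    else if ch = '\\' then (true, single, double)
    else if ch = '\'' then (escaped, single ^^^ 1, double)
    else if ch = '"' then (escaped, single, double ^^^ 1)
    else (escaped, single, double)

def unbalanced_quotes_py (text : String) : Bool :=
  let st := text.toList.foldl stepA (false, 0, 0)
  decide (st.2.1 ≠ 0 ∨ st.2.2 ≠ 0)

-- ===== PORT B =====
-- Hand port of re.sub(r'\\.', '', text, flags=re.DOTALL): exact, because the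
-- pattern is 'backslash followed by any character (DOTALL)' and re.sub removes
-- its matches left to right, non-overlapping — i.e. a backslash and the next
-- character are dropped as a pair, and a lone trailing backslash survives.
def cleanB : List Char → List Char
  | [] => []
  | ['\\'] => ['\\']
  | '\\' :: _ :: rest => cleanB rest
  | c :: rest => c :: cleanB rest

-- cleaned.count(q) for the one-character needles "'" and '"' is ported as
-- List.count of that character (the corresponding Lean function).
def unbalanced_quotes_py_alt (text : String) : Bool :=
  let cleaned := cleanB text.toList
  cleaned.count '\'' % 2 == 1 || cleaned.count '"' % 2 == 1

-- ===== PRECONDITION & SPEC =====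
def Spec_unbalanced_quotes_py (text : String) (out : Bool) : Prop := out = unbalanced_quotes_py_alt text
instance (text : String) (out : Bool) : Decidable (Spec_unbalanced_quotes_py text out) := by unfold Spec_unbalanced_quotes_py; infer_instance

-- ===== CLAIM (what is proved, stated in full; the proofs are below) =====
def Claim_equal_unbalanced_quotes_py : Prop := ∀ (text : String), Dom_unbalanced_quotes_py text → Spec_unbalanced_quotes_py text (unbalanced_quotes_py text)

-- ===== LEMMAS AND PROOFS =====

-- After setting the escaped flag, A's fold ignores the next character.
lemma foldA_esc (l : List Char) (s d : Nat) :
    (List.foldl stepA (true, s, d) l).2 = (List.foldl stepA (false, s, d) l.tail).2 := by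
  cases l with
  | nil => rfl
  | cons c t => simp [List.foldl, stepA]

-- A's xor bits are exactly the parities of the quote counts of the cleaned list.
lemma foldA_parity : ∀ (n : Nat) (l : List Char), l.length ≤ n → ∀ s d : Nat, s ≤ 1 → d ≤ 1 →
    (List.foldl stepA (false, s, d) l).2
      = ((s + (cleanB l).count '\'') % 2, (d + (cleanB l).count '"') % 2) := by
  intro n
  induction n with
  | zero =>
    intro l hl s d hs hd
    have : l = [] := List.eq_nil_of_length_eq_zero (Nat.le_zero.mp hl)
    subst this
    simp [cleanB, Prod.ext_iff]; omega
  | succ n ih =>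
    intro l hl s d hs hd
    cases l with
    | nil => simp [cleanB, Prod.ext_iff]; omega
    | cons ch rest =>
      simp only [List.length_cons] at hl
      have hr : rest.length ≤ n := by omega
      by_cases h1 : ch = '\\'
      · subst h1
        cases rest with
        | nil =>
          simp [List.foldl, stepA, cleanB, Prod.ext_iff]; omega
        | cons x rest' =>
          have hr' : rest'.length ≤ n := by simp at hl; omega
          have e1 : List.foldl stepA (false, s, d) ('\\' :: x :: rest')
              = List.foldl stepA (true, s, d) (x :: rest') := by
            simp [List.foldl, stepA]
          rw [e1, foldA_esc]
          simpa [cleanB] using ih rest' hr' s d hs hd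
      · by_cases h2 : ch = '\''
        · subst h2
          have hs1 : s ^^^ 1 ≤ 1 := by interval_cases s <;> decide
          have e1 : List.foldl stepA (false, s, d) ('\'' :: rest)
              = List.foldl stepA (false, s ^^^ 1, d) rest := by
            simp [List.foldl, stepA]
          rw [e1, ih rest hr (s ^^^ 1) d hs1 hd]
          have hx : s ^^^ 1 = 1 - s := by interval_cases s <;> decide
          have hc : cleanB ('\'' :: rest) = '\'' :: cleanB rest := by
            cases rest <;> simp [cleanB]
          simp [hc, Prod.ext_iff, hx]; omega
        · by_cases h3 : ch = '"'
          · subst h3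
            have hd1 : d ^^^ 1 ≤ 1 := by interval_cases d <;> decide
            have e1 : List.foldl stepA (false, s, d) ('"' :: rest)
                = List.foldl stepA (false, s, d ^^^ 1) rest := by
              simp [List.foldl, stepA]
            rw [e1, ih rest hr s (d ^^^ 1) hs hd1]
            have hx : d ^^^ 1 = 1 - d := by interval_cases d <;> decide
            have hc : cleanB ('"' :: rest) = '"' :: cleanB rest := by
              cases rest <;> simp [cleanB]
            simp [hc, Prod.ext_iff, hx]; omega
          · have e1 : List.foldl stepA (false, s, d) (ch :: rest)
                = List.foldl stepA (false, s, d) rest := by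
              simp [List.foldl, stepA, h1, h2, h3]
            rw [e1, ih rest hr s d hs hd]
            have hc : cleanB (ch :: rest) = ch :: cleanB rest := by
              cases rest <;> simp_all [cleanB]
            simp [hc, h2, h3]

-- ===== VERDICT (by name: the statement is the Claim_ definition above) =====
theorem unbalanced_quotes_py_spec : Claim_equal_unbalanced_quotes_py := by
  intro text _
  unfold Spec_unbalanced_quotes_py unbalanced_quotes_py unbalanced_quotes_py_alt
  have h := foldA_parity text.toList.length text.toList le_rfl 0 0 (by omega) (by omega)
  simp only [Nat.zero_add] at h
  simp only [h]
  rcases Nat.mod_two_eq_zero_or_one ((cleanB text.toList).count '\'') with h1 | h1 <;>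
    rcases Nat.mod_two_eq_zero_or_one ((cleanB text.toList).count '"') with h2 | h2 <;>
      simp [h1, h2]
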